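-- pv_equiv track=rewrite | github.com/basoro/mlite | docker/panel/app.py | categorize_services
-- ===== SOURCE A (Python) =====
-- def categorize_services(containers):
--     """Categorize services into groups"""
--     categories = {
--         'PHP Containers': [],
--         'Web Services': [],
--         'Database & Services': []
--     }
--     for container in containers:
--         service_name = container['service']
--         if service_name.startswith('php'):
--             categories['PHP Containers'].append(container)
--         elif service_name in ['nginx', 'panel']:
--             categories['Web Services'].append(container)
--         else:
--             categories['Database & Services'].append(container)
--     return categories
-- ===== SOURCE B (Python) =====
-- def categorize_services(containers):
--     """Categorize services into groups"""
--     def is_php(c):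
--         return c['service'].startswith('php')
--
--     def is_web(c):
--         return not is_php(c) and c['service'] in ('nginx', 'panel')
--
--     return {
--         'PHP Containers': [c for c in containers if is_php(c)],
--         'Web Services': [c for c in containers if is_web(c)],
--         'Database & Services': [c for c in containers
--                                 if not is_php(c) and not is_web(c)],
--     }
-- ===== Notes on version B (the rewrite author's own statement) =====
-- stated objective: alternative
-- what changed: Replaces the single branching loop that appends into a mutable three-key dict with three independent filtering passes (one comprehension per category) assembled directly into the result dict.
import Mathlib
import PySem

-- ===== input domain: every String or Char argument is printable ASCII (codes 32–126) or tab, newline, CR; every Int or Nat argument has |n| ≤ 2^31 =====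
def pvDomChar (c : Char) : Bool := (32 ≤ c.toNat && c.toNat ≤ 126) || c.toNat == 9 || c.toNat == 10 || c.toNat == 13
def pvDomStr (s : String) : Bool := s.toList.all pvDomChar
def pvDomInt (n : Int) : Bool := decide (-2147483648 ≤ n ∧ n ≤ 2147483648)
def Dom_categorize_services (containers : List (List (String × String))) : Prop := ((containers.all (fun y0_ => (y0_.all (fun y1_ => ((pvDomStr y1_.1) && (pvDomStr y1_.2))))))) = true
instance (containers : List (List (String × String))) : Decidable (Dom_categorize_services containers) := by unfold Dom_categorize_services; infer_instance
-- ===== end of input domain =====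

-- B re-groups by three independent filtering passes instead of A's single branching loop; return value only (A mutates nothing).

-- ===== PORT A =====
-- one loop step: classify one container and append it into the matching bucket of the dict
def pvAStep (cats : PySem.Dict String (List (List (String × String))))
    (container : List (String × String)) : PySem.Dict String (List (List (String × String))) :=
  match (PySem.Dict.mk container).get? "service" with
  | none => cats   -- Python raises KeyError here; such inputs are excluded by Pre_
  | some service_name =>
    if PySem.Str.startswith service_name "php" then
      cats.modify "PHP Containers" [] (· ++ [container])
    else if service_name == "nginx" || service_name == "panel" then
      cats.modify "Web Services" [] (· ++ [container])
    else
      cats.modify "Database & Services" [] (· ++ [container])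

def categorize_services (containers : List (List (String × String))) : List (String × List (List (String × String))) :=
  let categories : PySem.Dict String (List (List (String × String))) :=
    ((PySem.Dict.empty.insert "PHP Containers" []).insert "Web Services" []).insert "Database & Services" []
  (containers.foldl pvAStep categories).items

-- ===== PORT B =====
def pvSvc (c : List (String × String)) : String := ((PySem.Dict.mk c).get? "service").getD ""
def pvIsPhp (c : List (String × String)) : Bool := PySem.Str.startswith (pvSvc c) "php"
def pvIsWeb (c : List (String × String)) : Bool := !pvIsPhp c && (pvSvc c == "nginx" || pvSvc c == "panel")

def categorize_services_alt (containers : List (List (String × String))) : List (String × List (List (String × String))) :=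
  [("PHP Containers", containers.filter pvIsPhp),
   ("Web Services", containers.filter pvIsWeb),
   ("Database & Services", containers.filter (fun c => !pvIsPhp c && !pvIsWeb c))]

-- ===== PRECONDITION & SPEC =====
-- Pre_ excludes containers without a 'service' key, on which both A and B raise KeyError.
def Pre_categorize_services (containers : List (List (String × String))) : Prop :=
  ∀ c ∈ containers, ((PySem.Dict.mk c).get? "service").isSome = true
instance (containers : List (List (String × String))) : Decidable (Pre_categorize_services containers) := by unfold Pre_categorize_services; infer_instance

def pvWitness_categorize_services : (List (List (String × String))) :=
  [[("service", "php7.4")], [("service", "nginx")], [("service", "mysql")]]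

def Spec_categorize_services (containers : List (List (String × String))) (out : List (String × List (List (String × String)))) : Prop := out = categorize_services_alt containers
instance (containers : List (List (String × String))) (out : List (String × List (List (String × String)))) : Decidable (Spec_categorize_services containers out) := by unfold Spec_categorize_services; infer_instance

-- ===== CLAIM (what is proved, stated in full; the proofs are below) =====
def Claim_equal_categorize_services : Prop := ∀ (containers : List (List (String × String))), Dom_categorize_services containers → Pre_categorize_services containers → Spec_categorize_services containers (categorize_services containers)

-- ===== LEMMAS AND PROOFS =====
def pvDict3 (a b d : List (List (String × String))) : PySem.Dict String (List (List (String × String))) :=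
  PySem.Dict.mk [("PHP Containers", a), ("Web Services", b), ("Database & Services", d)]

lemma pvStep_eq (a b d : List (List (String × String))) (c : List (String × String))
    (h : ((PySem.Dict.mk c).get? "service").isSome = true) :
    pvAStep (pvDict3 a b d) c =
      pvDict3 (a ++ if pvIsPhp c then [c] else [])
              (b ++ if pvIsWeb c then [c] else [])
              (d ++ if !pvIsPhp c && !pvIsWeb c then [c] else []) := by
  obtain ⟨s, hs⟩ := Option.isSome_iff_exists.mp h
  simp only [pvAStep, hs, pvIsPhp, pvIsWeb, pvSvc, Option.getD_some]
  by_cases hp : PySem.Str.startswith s "php" = true <;>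
  by_cases hw : (s == "nginx" || s == "panel") = true <;>
    simp_all [pvDict3, PySem.Dict.modify, PySem.Dict.get?, PySem.Dict.insert,
      PySem.Dict.contains, PySem.Dict.getD] <;> tauto

lemma pvLoop (l : List (List (String × String))) (a b d : List (List (String × String)))
    (h : ∀ c ∈ l, ((PySem.Dict.mk c).get? "service").isSome = true) :
    (l.foldl pvAStep (pvDict3 a b d)).items =
      [("PHP Containers", a ++ l.filter pvIsPhp),
       ("Web Services", b ++ l.filter pvIsWeb),
       ("Database & Services", d ++ l.filter (fun c => !pvIsPhp c && !pvIsWeb c))] := by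
  induction l generalizing a b d with
  | nil => simp [pvDict3]
  | cons c t ih =>
    rw [List.foldl_cons, pvStep_eq a b d c (h c (by simp)),
      ih _ _ _ (fun x hx => h x (by simp [hx]))]
    by_cases hp : pvIsPhp c = true <;> by_cases hw : pvIsWeb c = true <;>
      simp [hp, hw]

-- ===== VERDICT (by name: the statement is the Claim_ definition above) =====
theorem categorize_services_spec : Claim_equal_categorize_services := by
  intro containers _ hpre
  show _ = _
  have hinit : (((PySem.Dict.empty.insert "PHP Containers" []).insert "Web Services" []).insert "Database & Services" []
      : PySem.Dict String (List (List (String × String)))) = pvDict3 [] [] [] := by decide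
  simp only [categorize_services, hinit, categorize_services_alt]
  rw [pvLoop containers [] [] [] hpre]
  simp
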